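-- pv_equiv track=rewrite | github.com/hyskoniho/beecrowd | 2. AD-HOC/1574.py | caminhada
-- ===== SOURCE A (Python) =====
-- def caminhada(pos: int, lista: list, idx: int) -> int:
--     if lista[idx-1] == "LEFT":
--         pos -= 1
--     elif lista[idx-1] == "RIGHT":
--         pos += 1
--     else:
--         pos = caminhada(pos, lista, int(lista[idx-1].split()[2]))
--     return pos
-- ===== SOURCE B (Python) =====
-- def caminhada(pos: int, lista: list, idx: int) -> int:
--     # Compile each instruction once into a (is_step, value) pair, then run
--     # the compiled table: a step pair ends the walk, a jump pair redirects it.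
--     def compile_instr(s):
--         if s == "LEFT":
--             return (True, -1)
--         if s == "RIGHT":
--             return (True, 1)
--         try:
--             return (False, int(s.split()[2]))
--         except (IndexError, ValueError):
--             return (False, None)
--     prog = [compile_instr(s) for s in lista]
--     is_step, val = prog[idx - 1]
--     while not is_step:
--         is_step, val = prog[val - 1]
--     return pos + val
-- ===== Notes on version B (the rewrite author's own statement) =====
-- stated objective: alternative
-- what changed: Replaced A's recursion (which re-parses the current cell and threads pos through every GOTO frame) by a compile-then-run interpreter: one pass compiles every instruction into a step/jump table, then an iterative walk over the table follows jumps and adds the single +-1 at the end.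
import Mathlib
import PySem

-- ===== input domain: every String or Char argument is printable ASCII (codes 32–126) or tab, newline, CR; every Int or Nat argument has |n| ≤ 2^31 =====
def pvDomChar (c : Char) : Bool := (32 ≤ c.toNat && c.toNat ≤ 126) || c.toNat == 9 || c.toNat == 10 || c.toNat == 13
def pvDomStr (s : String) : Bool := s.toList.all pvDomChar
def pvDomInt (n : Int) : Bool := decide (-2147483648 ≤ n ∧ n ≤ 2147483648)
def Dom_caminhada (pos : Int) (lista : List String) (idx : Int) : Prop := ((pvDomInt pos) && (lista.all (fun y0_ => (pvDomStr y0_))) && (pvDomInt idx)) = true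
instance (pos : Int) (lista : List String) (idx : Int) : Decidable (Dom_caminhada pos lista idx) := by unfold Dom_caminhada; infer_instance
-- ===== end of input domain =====

-- B replaces A's recursion by a compile-then-run interpreter: one pass compiles
-- every instruction into a step/jump table, then an iterative walk over the table
-- follows jumps and adds the single ±1 at the end. Return-value equivalence only
-- (neither program mutates its arguments).

-- ===== PORT A =====
-- int(s.split()[2]); none exactly where Python raises IndexError/ValueError
def jumpTarget? (s : String) : Option Int :=
  ((PySem.Str.split₀ s)[2]?).bind PySem.Int.ofStr?

-- A's recursion, made total with fuel (never exhausted under Pre_)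
def caminhadaFuel : Nat → Int → List String → Int → Int
  | 0, pos, _, _ => pos
  | fuel+1, pos, lista, idx =>
    match PySem.List.pyGet? lista (idx - 1) with
    | none => pos
    | some s =>
      if s = "LEFT" then pos - 1
      else if s = "RIGHT" then pos + 1
      else
        match jumpTarget? s with
        | some k => caminhadaFuel fuel pos lista k
        | none => pos

def caminhada (pos : Int) (lista : List String) (idx : Int) : Int :=
  caminhadaFuel (lista.length + 1) pos lista idx

-- ===== PORT B =====
-- the compiled form of one instruction: a terminal ±1 step, or a jump target
-- (jump none = an unparsable cell, where Python B's walk would crash — outside Pre_)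
inductive Instr
  | step : Int → Instr
  | jump : Option Int → Instr
deriving DecidableEq, Repr

def compileInstr (s : String) : Instr :=
  if s = "LEFT" then Instr.step (-1)
  else if s = "RIGHT" then Instr.step 1
  else Instr.jump (((PySem.Str.split₀ s)[2]?).bind PySem.Int.ofStr?)

-- prog[i-1] (Python's negative-index rule); default unreached under Pre_
def fetch (prog : List Instr) (i : Int) : Instr :=
  (PySem.List.pyGet? prog (i - 1)).getD (Instr.jump none)

-- the while-loop over the compiled table (fuel never exhausted under Pre_)
def walkB : Nat → List Instr → Int → Instr → Int
  | _, _, pos, Instr.step d => pos + d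
  | fuel+1, prog, pos, Instr.jump (some t) => walkB fuel prog pos (fetch prog t)
  | _, _, pos, Instr.jump _ => pos

def caminhada_alt (pos : Int) (lista : List String) (idx : Int) : Int :=
  let prog := lista.map compileInstr
  walkB (prog.length + 1) prog pos (fetch prog idx)

-- ===== PRECONDITION & SPEC =====
-- cell holding s is good under g: LEFT/RIGHT, or a parsable jump to a good cell
def okCell (lista : List String) (g : List Bool) (s : String) : Bool :=
  if s = "LEFT" then true
  else if s = "RIGHT" then true
  else
    match jumpTarget? s with
    | some t =>
      match PySem.List.pyIdx? lista.length (t - 1) with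
      | some j => g.getD j false
      | none => false
    | none => false

-- cells from which a LEFT/RIGHT is reached in ≤ k instructions (backward closure)
def goodN (lista : List String) : Nat → List Bool
  | 0 => lista.map fun _ => false
  | k+1 => lista.map (okCell lista (goodN lista k))

-- Pre_: following the jump instructions from idx (Python index rules) reaches a
-- LEFT/RIGHT cell — exactly the inputs on which A returns; on all others A raises
-- (IndexError/ValueError at a bad or out-of-range cell, RecursionError on a cycle).
-- Stated as a backward closure over the instruction table, not by running a port.
def Pre_caminhada (pos : Int) (lista : List String) (idx : Int) : Prop :=
  (match PySem.List.pyIdx? lista.length (idx - 1) with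
   | some j => (goodN lista lista.length).getD j false
   | none => false) = true

instance (pos : Int) (lista : List String) (idx : Int) : Decidable (Pre_caminhada pos lista idx) := by
  unfold Pre_caminhada; infer_instance

def pvWitness_caminhada : Int × List String × Int := (0, ["SAME AS 3", "LEFT", "RIGHT"], 1)

def Spec_caminhada (pos : Int) (lista : List String) (idx : Int) (out : Int) : Prop := out = caminhada_alt pos lista idx
instance (pos : Int) (lista : List String) (idx : Int) (out : Int) : Decidable (Spec_caminhada pos lista idx out) := by unfold Spec_caminhada; infer_instance

-- ===== CLAIM =====
def Claim_equal_caminhada : Prop := ∀ (pos : Int) (lista : List String) (idx : Int), Dom_caminhada pos lista idx → Pre_caminhada pos lista idx → Spec_caminhada pos lista idx (caminhada pos lista idx)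

-- ===== LEMMAS AND PROOFS =====

lemma pyIdx?_lt {n : Nat} {i : Int} {j : Nat} (h : PySem.List.pyIdx? n i = some j) : j < n := by
  unfold PySem.List.pyIdx? at h
  split_ifs at h <;> simp_all <;> omega

lemma pyGet?_of_idx {α : Type} (xs : List α) {i : Int} {j : Nat}
    (h : PySem.List.pyIdx? xs.length i = some j) (hj : j < xs.length) :
    PySem.List.pyGet? xs i = some xs[j] := by
  simp [PySem.List.pyGet?, h, List.getElem?_eq_getElem hj]

lemma pyGet?_map {α β : Type} (f : α → β) (l : List α) (i : Int) :
    PySem.List.pyGet? (l.map f) i = (PySem.List.pyGet? l i).map f := by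
  simp [PySem.List.pyGet?, Option.bind]
  rcases h : PySem.List.pyIdx? l.length i with _ | k <;> simp

lemma compileInstr_jump {s : String} (hL : ¬ s = "LEFT") (hR : ¬ s = "RIGHT") :
    compileInstr s = Instr.jump (jumpTarget? s) := by
  simp [compileInstr, jumpTarget?, hL, hR]

lemma fetch_map (lista : List String) {i : Int} {j : Nat}
    (h : PySem.List.pyIdx? lista.length (i - 1) = some j) (hj : j < lista.length) :
    fetch (lista.map compileInstr) i = compileInstr lista[j] := by
  have : PySem.List.pyGet? lista (i - 1) = some lista[j] := pyGet?_of_idx lista h hj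
  simp [fetch, pyGet?_map, this]

lemma goodN_succ_getD (lista : List String) (k : Nat) {j : Nat} (hj : j < lista.length) :
    (goodN lista (k+1)).getD j false = okCell lista (goodN lista k) lista[j] := by
  simp [goodN, List.getD, hj]

lemma walk_eq (lista : List String) :
    ∀ (k fa fb : Nat) (pos i : Int) (j : Nat),
      PySem.List.pyIdx? lista.length (i - 1) = some j →
      (goodN lista k).getD j false = true →
      k ≤ fa → k ≤ fb →
      caminhadaFuel fa pos lista i =
        walkB fb (lista.map compileInstr) pos (fetch (lista.map compileInstr) i) := by
  intro k
  induction k with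
  | zero =>
    intro fa fb pos i j _ hgood _ _
    simp [goodN, List.getD] at hgood
  | succ k ih =>
    intro fa fb pos i j hidx hgood hfa hfb
    obtain ⟨fa, rfl⟩ : ∃ m, fa = m + 1 := ⟨fa - 1, by omega⟩
    obtain ⟨fb, rfl⟩ : ∃ m, fb = m + 1 := ⟨fb - 1, by omega⟩
    have hj : j < lista.length := pyIdx?_lt hidx
    have hget : PySem.List.pyGet? lista (i - 1) = some lista[j] := pyGet?_of_idx lista hidx hj
    have hfetch := fetch_map lista hidx hj
    rw [goodN_succ_getD lista k hj] at hgood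
    set s := lista[j] with hs
    by_cases hL : s = "LEFT"
    · simp [caminhadaFuel, hget, hL, hfetch, compileInstr, walkB]
      omega
    · by_cases hR : s = "RIGHT"
      · simp [caminhadaFuel, hget, hR, hfetch, compileInstr, walkB]
      · rcases ht : jumpTarget? s with _ | t
        · simp only [okCell, hL, hR, if_false, ht] at hgood
          exact absurd hgood (by decide)
        · rcases hidx' : PySem.List.pyIdx? lista.length (t - 1) with _ | j'
          · simp only [okCell, hL, hR, if_false, ht, hidx'] at hgood
            exact absurd hgood (by decide)
          · simp only [okCell, hL, hR, if_false, ht, hidx'] at hgood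
            rw [hfetch, compileInstr_jump hL hR, ht]
            simp only [caminhadaFuel, hget, hL, hR, if_false, ht, walkB]
            exact ih fa fb pos t j' hidx' hgood (by omega) (by omega)

-- ===== VERDICT =====
theorem caminhada_spec : Claim_equal_caminhada := by
  intro pos lista idx _ hpre
  unfold Pre_caminhada at hpre
  rcases hidx : PySem.List.pyIdx? lista.length (idx - 1) with _ | j
  · rw [hidx] at hpre; simp at hpre
  · rw [hidx] at hpre
    unfold Spec_caminhada caminhada caminhada_alt
    simp only [List.length_map]
    exact walk_eq lista lista.length (lista.length + 1) (lista.length + 1) pos idx j hidx hpre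
      (by omega) (by omega)
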